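-- pv_equiv track=rewrite | github.com/Azure/azure-cli-extensions | src/interactive/azext_interactive/azclishell/app.py | space_toolbar
-- ===== SOURCE A (Python) =====
-- NOTIFICATIONS = ""
--
-- def space_toolbar(settings_items, empty_space):
--     """ formats the toolbar """
--     counter = 0
--     for part in settings_items:
--         counter += len(part)
--
--     if len(settings_items) == 1:
--         spacing = ''
--     else:
--         # Calculate the length of space between items
--         spacing_len = (len(empty_space) - len(NOTIFICATIONS) - counter) // (len(settings_items) - 1)
--         if spacing_len < 0:
--             # Not display the first item of settings if the space is not enough
--             return space_toolbar(settings_items[1:], empty_space)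
--         # Sample spacing string from `empty_space`
--         spacing = empty_space[:spacing_len]
--
--     settings = spacing.join(settings_items)
--
--     empty_space = empty_space[len(NOTIFICATIONS) + len(settings) + 1:]
--     return settings, empty_space
-- ===== SOURCE B (Python) =====
-- NOTIFICATIONS = ""
--
-- def space_toolbar(settings_items, empty_space):
--     """ formats the toolbar (iterative: drop leading items until the rest fits) """
--     budget = len(empty_space) - len(NOTIFICATIONS)
--     items = settings_items
--     total = sum(len(p) for p in items)
--     # drop leading items while more than one remains and they do not fit
--     while len(items) > 1 and total > budget:
--         total -= len(items[0])
--         items = items[1:]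
--     if len(items) == 1:
--         spacing = ''
--     else:
--         spacing = empty_space[:(budget - total) // (len(items) - 1)]
--     settings = spacing.join(items)
--     return settings, empty_space[len(NOTIFICATIONS) + len(settings) + 1:]
-- ===== Notes on version B (the rewrite author's own statement) =====
-- stated objective: faster
-- what changed: Replaces A's tail recursion (which re-sums all remaining item lengths and re-divides on every retry, O(n^2) and recursion-depth bound) with a single up-front sum and one explicit drop-loop maintaining a running total, using the simplified fit test total > available.
import Mathlib
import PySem

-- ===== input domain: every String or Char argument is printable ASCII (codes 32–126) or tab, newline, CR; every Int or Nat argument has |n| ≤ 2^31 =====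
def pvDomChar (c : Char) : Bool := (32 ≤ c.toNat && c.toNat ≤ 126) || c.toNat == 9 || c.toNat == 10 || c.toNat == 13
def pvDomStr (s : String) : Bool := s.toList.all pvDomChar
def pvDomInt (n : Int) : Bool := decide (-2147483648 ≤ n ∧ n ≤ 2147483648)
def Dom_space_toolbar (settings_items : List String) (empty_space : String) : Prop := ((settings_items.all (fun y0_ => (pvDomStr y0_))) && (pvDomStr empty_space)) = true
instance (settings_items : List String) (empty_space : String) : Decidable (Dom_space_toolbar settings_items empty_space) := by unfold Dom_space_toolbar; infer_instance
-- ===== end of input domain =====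

-- B replaces A's tail recursion (which re-sums all lengths each retry) by one up-front sum
-- and an explicit drop-loop with a running total; return values agree on Pre_ (proved below).

-- ===== PORT A =====
def space_toolbar (settings_items : List String) (empty_space : String) : String × String :=
  let counter : Int := settings_items.foldl (fun acc part => acc + PySem.Str.len part) 0
  if settings_items.length = 1 then
    let settings := PySem.Str.join "" settings_items
    (settings, PySem.Str.slice empty_space (some (PySem.Str.len settings + 1)) none)
  else
    let spacing_len := PySem.Int.floordiv (PySem.Str.len empty_space - 0 - counter)
                          ((settings_items.length : Int) - 1)
    if spacing_len < 0 then
      match settings_items with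
      | [] => ("", "")  -- Python recurses forever here (RecursionError); outside Pre_
      | _ :: rest => space_toolbar rest empty_space
    else
      let spacing := PySem.Str.slice empty_space none (some spacing_len)
      let settings := PySem.Str.join spacing settings_items
      (settings, PySem.Str.slice empty_space (some (PySem.Str.len settings + 1)) none)
termination_by settings_items.length

-- ===== PORT B =====
-- the while loop of Source B: drop leading items while more than one remains and they do not fit
def stDropLoop (budget : Int) : List String → Int → List String × Int
  | [], total => ([], total)
  | p :: rest, total =>
      if rest.length ≥ 1 ∧ total > budget then stDropLoop budget rest (total - PySem.Str.len p)
      else (p :: rest, total)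

-- the straight-line code of Source B after the loop (items, total = st)
def stFinish (empty_space : String) (budget : Int) (st : List String × Int) : String × String :=
  let spacing :=
    if st.1.length = 1 then ""
    else PySem.Str.slice empty_space none
          (some (PySem.Int.floordiv (budget - st.2) ((st.1.length : Int) - 1)))
  let settings := PySem.Str.join spacing st.1
  (settings, PySem.Str.slice empty_space (some (PySem.Str.len settings + 1)) none)

def space_toolbar_alt (settings_items : List String) (empty_space : String) : String × String :=
  let budget : Int := PySem.Str.len empty_space - 0
  let total0 : Int := settings_items.foldl (fun acc p => acc + PySem.Str.len p) 0
  stFinish empty_space budget (stDropLoop budget settings_items total0)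

-- ===== PRECONDITION & SPEC =====
-- Pre_ excludes only settings_items = [] with empty_space ≠ "", where Python A raises
-- RecursionError (it recurses on the unchanged empty list forever).
def Pre_space_toolbar (settings_items : List String) (empty_space : String) : Prop :=
  settings_items ≠ [] ∨ empty_space = ""
instance (settings_items : List String) (empty_space : String) : Decidable (Pre_space_toolbar settings_items empty_space) := by unfold Pre_space_toolbar; infer_instance
def pvWitness_space_toolbar : List String × String := (["ab", "cd"], "        ")

def Spec_space_toolbar (settings_items : List String) (empty_space : String) (out : String × String) : Prop := out = space_toolbar_alt settings_items empty_space
instance (settings_items : List String) (empty_space : String) (out : String × String) : Decidable (Spec_space_toolbar settings_items empty_space out) := by unfold Spec_space_toolbar; infer_instance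

-- ===== CLAIM (what is proved, stated in full; the proofs are below) =====
def Claim_equal_space_toolbar : Prop := ∀ (settings_items : List String) (empty_space : String), Dom_space_toolbar settings_items empty_space → Pre_space_toolbar settings_items empty_space → Spec_space_toolbar settings_items empty_space (space_toolbar settings_items empty_space)

-- ===== LEMMAS AND PROOFS =====

theorem pv_foldl_shift (xs : List String) (a : Int) :
    xs.foldl (fun acc q => acc + PySem.Str.len q) a
      = a + xs.foldl (fun acc q => acc + PySem.Str.len q) 0 := by
  induction xs generalizing a with
  | nil => simp
  | cons y ys ih =>
    rw [List.foldl_cons, List.foldl_cons, ih, ih (0 + PySem.Str.len y)]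
    ring

theorem pv_floordiv_neg_iff (x d : Int) (hd : 0 < d) :
    PySem.Int.floordiv x d < 0 ↔ x < 0 := by
  rw [PySem.Int.floordiv_lt_iff_lt_mul hd]
  constructor <;> intro h <;> omega

theorem pv_main (settings_items : List String) (empty_space : String)
    (h : settings_items ≠ []) :
    space_toolbar settings_items empty_space = space_toolbar_alt settings_items empty_space := by
  induction settings_items with
  | nil => exact absurd rfl h
  | cons p rest ih =>
    by_cases h1 : rest = []
    · subst h1
      rw [space_toolbar]
      simp [space_toolbar_alt, stDropLoop, stFinish]
    · have hlen : 1 ≤ rest.length := by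
        cases rest with
        | nil => exact absurd rfl h1
        | cons q t => simp
      have hne : ¬ (p :: rest).length = 1 := by simp; omega
      have hpos : (0:Int) < ((p :: rest).length : Int) - 1 := by
        simp; omega
      have hsum : List.foldl (fun acc q => acc + PySem.Str.len q) 0 (p :: rest)
          - PySem.Str.len p = List.foldl (fun acc q => acc + PySem.Str.len q) 0 rest := by
        rw [List.foldl_cons, pv_foldl_shift]; ring
      by_cases hfit : List.foldl (fun acc q => acc + PySem.Str.len q) 0 (p :: rest)
          > PySem.Str.len empty_space - 0
      · have hneg : PySem.Int.floordiv
            (PySem.Str.len empty_space - 0 - List.foldl (fun acc q => acc + PySem.Str.len q) 0 (p :: rest))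
            (((p :: rest).length : Int) - 1) < 0 := by
          rw [pv_floordiv_neg_iff _ _ hpos]; omega
        have hA : space_toolbar (p :: rest) empty_space = space_toolbar rest empty_space := by
          rw [space_toolbar, if_neg hne, if_pos hneg]
        have hB : space_toolbar_alt (p :: rest) empty_space
            = space_toolbar_alt rest empty_space := by
          simp only [space_toolbar_alt]
          rw [stDropLoop, if_pos ⟨hlen, hfit⟩, hsum]
        rw [hA, hB]
        exact ih h1
      · have hnneg : ¬ PySem.Int.floordiv
            (PySem.Str.len empty_space - 0 - List.foldl (fun acc q => acc + PySem.Str.len q) 0 (p :: rest))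
            (((p :: rest).length : Int) - 1) < 0 := by
          rw [pv_floordiv_neg_iff _ _ hpos]; omega
        have hstop : ¬ (rest.length ≥ 1 ∧
            List.foldl (fun acc q => acc + PySem.Str.len q) 0 (p :: rest) > PySem.Str.len empty_space - 0) := by
          intro hc; exact hfit hc.2
        rw [space_toolbar, if_neg hne, if_neg hnneg]
        simp only [space_toolbar_alt]
        rw [stDropLoop, if_neg hstop]
        simp only [stFinish, hne, if_false]

-- ===== VERDICT (by name: the statement is the Claim_ definition above) =====
theorem space_toolbar_spec : Claim_equal_space_toolbar := by
  intro settings_items empty_space _ hpre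
  unfold Spec_space_toolbar
  rcases hpre with h | h
  · exact pv_main settings_items empty_space h
  · subst h
    cases settings_items with
    | nil =>
      rw [space_toolbar]
      decide
    | cons p rest => exact pv_main (p :: rest) "" (by simp)
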